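-- pv_equiv track=rewrite | github.com/manumissio/town-council | pipeline/agenda_summary.py | _agenda_items_summary_is_too_short
-- ===== SOURCE A (Python) =====
-- def _agenda_items_summary_is_too_short(text: str) -> bool:
--     if not text:
--         return True
--     value = text.strip()
--     if len(value) < 220:
--         return True
--     lower = value.lower()
--     required_sections = ("why this matters:", "top actions:", "potential impacts:", "unknowns:")
--     if any(section not in lower for section in required_sections):
--         return True
--     bullet_lines = [line for line in value.splitlines() if line.strip().startswith("- ")]
--     if len(bullet_lines) < 5:
--         return True
--
--     top_actions = 0
--     in_top_actions = False
--     for line in value.splitlines():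
--         stripped = line.strip().lower()
--         if stripped == "top actions:":
--             in_top_actions = True
--             continue
--         if stripped.endswith(":") and stripped != "top actions:":
--             in_top_actions = False
--         if in_top_actions and line.strip().startswith("- "):
--             top_actions += 1
--     return top_actions < 2
-- ===== SOURCE B (Python) =====
-- def _agenda_items_summary_is_too_short(text: str) -> bool:
--     if not text:
--         return True
--     value = text.strip()
--     if len(value) < 220:
--         return True
--     lower = value.lower()
--     if not all(s in lower for s in ("why this matters:", "top actions:", "potential impacts:", "unknowns:")):
--         return True
--     lines = value.splitlines()
--     if sum(1 for line in lines if line.strip().startswith("- ")) < 5: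
--         return True
--
--     # Declarative count: each bullet belongs to the nearest ':'-terminated header
--     # above it (a bullet that itself ends with ':' acts as a sub-header, not an item).
--     def owner(i):
--         for j in range(i - 1, -1, -1):
--             s = lines[j].strip().lower()
--             if s.endswith(":"):
--                 return s
--         return None
--
--     top_actions = sum(
--         1
--         for i in range(len(lines))
--         if lines[i].strip().startswith("- ")
--         and not lines[i].strip().lower().endswith(":")
--         and owner(i) == "top actions:"
--     )
--     return top_actions < 2
-- ===== Notes on version B (the rewrite author's own statement) =====
-- stated objective: alternative
-- what changed: A's final forward state-machine loop (a boolean in-section flag toggled line by line) is replaced by a declarative count: for each bullet line B searches backwards for the nearest ':'-terminated header above it and counts the bullet iff that header is 'top actions:'.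
import Mathlib
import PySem

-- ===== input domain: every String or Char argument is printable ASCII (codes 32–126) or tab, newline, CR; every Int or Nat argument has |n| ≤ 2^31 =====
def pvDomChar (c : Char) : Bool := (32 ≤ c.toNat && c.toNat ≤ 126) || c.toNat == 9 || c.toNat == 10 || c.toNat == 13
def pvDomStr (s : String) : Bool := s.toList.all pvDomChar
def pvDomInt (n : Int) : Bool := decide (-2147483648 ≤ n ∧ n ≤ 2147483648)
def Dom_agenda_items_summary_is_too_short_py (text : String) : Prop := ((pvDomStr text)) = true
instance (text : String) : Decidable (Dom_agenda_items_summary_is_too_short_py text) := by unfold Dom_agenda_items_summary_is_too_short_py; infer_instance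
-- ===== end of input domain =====

-- B replaces A's final forward state-machine loop by a declarative per-bullet count:
-- each bullet is counted iff the nearest ':'-terminated header found by scanning
-- backwards from it is exactly 'top actions:' (objective: alternative).

-- ===== PORT A =====
-- the body of A's final 'for line in value.splitlines()' loop, state (top_actions, in_top_actions)
def pvAStep (st : Int × Bool) (line : String) : Int × Bool :=
  let stripped := PySem.Str.lower (PySem.Str.strip line)
  if stripped == "top actions:" then (st.1, true)    -- 'continue'
  else
    let in_top := if PySem.Str.endswith stripped ":" && !(stripped == "top actions:") then false else st.2
    if in_top && PySem.Str.startswith (PySem.Str.strip line) "- " then (st.1 + 1, in_top)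
    else (st.1, in_top)

def agenda_items_summary_is_too_short_py (text : String) : Bool :=
  if text == "" then true
  else
    let value := PySem.Str.strip text
    if PySem.Str.len value < 220 then true
    else
      let lower := PySem.Str.lower value
      if ["why this matters:", "top actions:", "potential impacts:", "unknowns:"].any
          (fun s => !(PySem.Str.isIn s lower)) then true
      else
        let bullet_lines := (PySem.Str.splitlines value).filter
          (fun line => PySem.Str.startswith (PySem.Str.strip line) "- ")
        if bullet_lines.length < 5 then true
        else
          let st := (PySem.Str.splitlines value).foldl pvAStep ((0 : Int), false)
          decide (st.1 < 2)

-- ===== PORT B =====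
-- B's 'owner(i)': scan j = i-1 … 0, return the first stripped-lowered line ending in ':'
def pvOwner (lines : List String) (i : Int) : Option String :=
  ((PySem.List.pyRange (i - 1) (-1) (-1)).map
      (fun j => PySem.Str.lower (PySem.Str.strip (PySem.List.pyGetD lines j "")))).find?
    (fun s => PySem.Str.endswith s ":")

def agenda_items_summary_is_too_short_py_alt (text : String) : Bool :=
  if text == "" then true
  else
    let value := PySem.Str.strip text
    if PySem.Str.len value < 220 then true
    else
      let lower := PySem.Str.lower value
      if !(["why this matters:", "top actions:", "potential impacts:", "unknowns:"].all
          (fun s => PySem.Str.isIn s lower)) then true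
      else
        let lines := PySem.Str.splitlines value
        if lines.countP (fun line => PySem.Str.startswith (PySem.Str.strip line) "- ") < 5 then true
        else
          -- sum of 1s over range(len(lines)) = countP over the range
          let top := (PySem.List.pyRange 0 (PySem.List.len lines) 1).countP (fun i =>
            PySem.Str.startswith (PySem.Str.strip (PySem.List.pyGetD lines i "")) "- "
            && !(PySem.Str.endswith (PySem.Str.lower (PySem.Str.strip (PySem.List.pyGetD lines i ""))) ":")
            && (pvOwner lines i == some "top actions:"))
          decide (top < 2)

-- ===== PRECONDITION & SPEC =====
def Spec_agenda_items_summary_is_too_short_py (text : String) (out : Bool) : Prop := out = agenda_items_summary_is_too_short_py_alt text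
instance (text : String) (out : Bool) : Decidable (Spec_agenda_items_summary_is_too_short_py text out) := by unfold Spec_agenda_items_summary_is_too_short_py; infer_instance

-- ===== CLAIM (what is proved, stated in full; the proofs are below) =====
def Claim_equal_agenda_items_summary_is_too_short_py : Prop := ∀ (text : String), Dom_agenda_items_summary_is_too_short_py text → Spec_agenda_items_summary_is_too_short_py text (agenda_items_summary_is_too_short_py text)

-- ===== LEMMAS AND PROOFS =====

-- the number of counted bullets on a suffix of lines, given the governing header
-- (lowered, stripped) inherited from the already-read prefix
def pvCnt : Option String → List String → Nat
  | _, [] => 0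
  | h, l :: r =>
      (if PySem.Str.startswith (PySem.Str.strip l) "- "
          && !(PySem.Str.endswith (PySem.Str.lower (PySem.Str.strip l)) ":")
          && (h == some "top actions:") then 1 else 0)
      + pvCnt (if PySem.Str.endswith (PySem.Str.lower (PySem.Str.strip l)) ":"
               then some (PySem.Str.lower (PySem.Str.strip l)) else h) r

-- the governing header of position k: nearest header among the first k lines
def pvOwnK (lines : List String) (k : Nat) : Option String :=
  ((lines.take k).reverse.map (fun l => PySem.Str.lower (PySem.Str.strip l))).find?
    (fun s => PySem.Str.endswith s ":")

lemma pvA_cnt (l : List String) : ∀ (h : Option String) (n : Int),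
    (l.foldl pvAStep (n, h == some "top actions:")).1 = n + (pvCnt h l : Int) := by
  induction l with
  | nil => intro h n; simp [pvCnt]
  | cons x r ih =>
    intro h n
    simp only [List.foldl_cons]
    by_cases htop : PySem.Str.lower (PySem.Str.strip x) = "top actions:"
    · have htopB : (PySem.Str.lower (PySem.Str.strip x) == "top actions:") = true := by
        rw [htop]; decide
      have hends : PySem.Str.endswith (PySem.Str.lower (PySem.Str.strip x)) ":" = true := by
        rw [htop]; decide
      have hA : pvAStep (n, h == some "top actions:") x = (n, true) := by
        simp only [pvAStep, htopB, if_true]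
      have ht : (true : Bool) = ((some "top actions:" : Option String) == some "top actions:") := by decide
      rw [hA, ht, ih (some "top actions:") n]
      have hlit : PySem.Str.endswith "top actions:" ":" = true := by decide
      have hc : pvCnt h (x :: r) = pvCnt (some "top actions:") r := by
        simp only [pvCnt, htop, hlit, Bool.not_true, Bool.and_false, Bool.false_and,
          if_true, if_false, Bool.false_eq_true, Nat.zero_add]
      rw [hc]
    · have htopB : (PySem.Str.lower (PySem.Str.strip x) == "top actions:") = false := by
        simpa using htop
      by_cases hends : PySem.Str.endswith (PySem.Str.lower (PySem.Str.strip x)) ":" = true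
      · have hA : pvAStep (n, h == some "top actions:") x = (n, false) := by
          simp only [pvAStep, htopB, hends, Bool.false_eq_true, if_false,
            Bool.not_false, Bool.and_self, if_true, Bool.false_and]
        have hfalse : (false : Bool)
            = ((some (PySem.Str.lower (PySem.Str.strip x)) : Option String) == some "top actions:") := by
          simp [htop]
        rw [hA, hfalse, ih _ n]
        have hc : pvCnt h (x :: r) = pvCnt (some (PySem.Str.lower (PySem.Str.strip x))) r := by
          simp only [pvCnt, hends, Bool.not_true, Bool.and_false, Bool.false_and, if_true,
            if_false, Bool.false_eq_true, Nat.zero_add]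
        rw [hc]
      · have hendsF : PySem.Str.endswith (PySem.Str.lower (PySem.Str.strip x)) ":" = false := by
          simpa using hends
        have hc : pvCnt h (x :: r)
            = (if (PySem.Str.startswith (PySem.Str.strip x) "- "
                  && (h == some "top actions:")) = true then 1 else 0) + pvCnt h r := by
          simp only [pvCnt, hendsF, Bool.not_false, Bool.and_true, if_false,
            Bool.false_eq_true]
        rcases Bool.eq_false_or_eq_true (PySem.Str.startswith (PySem.Str.strip x) "- ") with hbB | hbB <;>
          rcases Bool.eq_false_or_eq_true (h == some "top actions:") with hfB | hfB
        all_goals (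
          have hA : pvAStep (n, h == some "top actions:") x
              = (n + (if (PySem.Str.startswith (PySem.Str.strip x) "- "
                        && (h == some "top actions:")) = true then 1 else 0),
                 h == some "top actions:") := by
            simp only [pvAStep, htopB, hendsF, Bool.false_eq_true, if_false,
              Bool.and_false, Bool.not_false,
              hbB, hfB, Bool.and_self, if_true]
            try simp
            try omega
          rw [hA, ih h _, hc]
          push_cast
          ring)

-- range(0, k)[j] indexing realises take
lemma pvMapTake (xs : List String) (k : Nat) (hk : k ≤ xs.length) :
    (PySem.List.pyRange 0 (k : Int) 1).map (fun j => PySem.List.pyGetD xs j "") = xs.take k := by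
  rw [PySem.List.pyRange_one]
  simp only [sub_zero, Int.toNat_natCast, List.map_map]
  apply List.ext_getElem
  · simp [hk]
  · intro i h1 h2
    simp only [List.getElem_map, List.getElem_range, Function.comp_apply, zero_add,
      List.getElem_take]
    have hi : i < xs.length := by
      simp at h2; omega
    rw [PySem.List.pyGetD_natCast]
    exact List.getD_eq_getElem xs "" hi

-- B's owner at a Nat index is the nearest header among the first k lines
lemma pvOwner_eq (lines : List String) (k : Nat) (hk : k ≤ lines.length) :
    pvOwner lines (k : Int) = pvOwnK lines k := by
  unfold pvOwner pvOwnK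
  have h1 : PySem.List.pyRange ((k : Int) - 1) (-1) (-1)
      = (PySem.List.pyRange 0 (k : Int) 1).reverse := by
    rw [PySem.List.pyRange_neg_one_eq_reverse]
    norm_num
  rw [h1, List.map_reverse]
  have h2 : (PySem.List.pyRange 0 (k : Int) 1).map
      (fun j => PySem.Str.lower (PySem.Str.strip (PySem.List.pyGetD lines j "")))
      = (lines.take k).map (fun l => PySem.Str.lower (PySem.Str.strip l)) := by
    have := pvMapTake lines k hk
    calc (PySem.List.pyRange 0 (k : Int) 1).map
          (fun j => PySem.Str.lower (PySem.Str.strip (PySem.List.pyGetD lines j "")))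
        = ((PySem.List.pyRange 0 (k : Int) 1).map (fun j => PySem.List.pyGetD lines j "")).map
            (fun l => PySem.Str.lower (PySem.Str.strip l)) := by
          rw [List.map_map]; rfl
      _ = (lines.take k).map (fun l => PySem.Str.lower (PySem.Str.strip l)) := by rw [this]
  rw [h2, List.map_reverse]

-- B's counted range realises pvCnt on the remaining suffix
lemma pvB_cnt (lines : List String) : ∀ (r : List String) (k : Nat), lines.drop k = r →
    (PySem.List.pyRange (k : Int) (PySem.List.len lines) 1).countP (fun i =>
        PySem.Str.startswith (PySem.Str.strip (PySem.List.pyGetD lines i "")) "- "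
        && !(PySem.Str.endswith (PySem.Str.lower (PySem.Str.strip (PySem.List.pyGetD lines i ""))) ":")
        && (pvOwner lines i == some "top actions:"))
      = pvCnt (pvOwnK lines k) r := by
  intro r
  induction r with
  | nil =>
    intro k hk
    have hlen : lines.length ≤ k := by
      by_contra h
      have : lines.drop k ≠ [] := by
        simp [List.drop_eq_nil_iff]
        omega
      exact this hk
    have hnil : PySem.List.pyRange (k : Int) (PySem.List.len lines) 1 = [] := by
      apply PySem.List.pyRange_one_eq_nil
      simp [PySem.List.len]
      try exact_mod_cast hlen
    rw [hnil]
    simp [pvCnt]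
  | cons x r ih =>
    intro k hk
    have hklt : k < lines.length := by
      by_contra h
      have : lines.drop k = [] := by
        simp [List.drop_eq_nil_iff]; omega
      rw [this] at hk; exact absurd hk (by simp)
    have hx : lines[k] = x := by
      have h1 : lines[k]? = some x := by
        rw [← List.head?_drop, hk]; rfl
      have h2 : lines[k]? = some lines[k] := List.getElem?_eq_getElem hklt
      rw [h1] at h2
      exact (Option.some.inj h2).symm
    have hdrop : lines.drop (k + 1) = r := by
      have h3 := congrArg (List.drop 1) hk
      simpa [List.drop_drop, Nat.add_comm] using h3
    have hcons : PySem.List.pyRange (k : Int) (PySem.List.len lines) 1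
        = (k : Int) :: PySem.List.pyRange ((k : Int) + 1) (PySem.List.len lines) 1 := by
      apply PySem.List.pyRange_one_cons
      simp [PySem.List.len]
      try exact_mod_cast hklt
    rw [hcons, List.countP_cons]
    have hget : PySem.List.pyGetD lines ((k : Nat) : Int) "" = x := by
      rw [PySem.List.pyGetD_natCast]
      rw [List.getD_eq_getElem lines "" hklt, hx]
    have hownk : pvOwner lines ((k : Nat) : Int) = pvOwnK lines k :=
      pvOwner_eq lines k (le_of_lt hklt)
    have hksucc : ((k : Int) + 1) = ((k + 1 : Nat) : Int) := by push_cast; ring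
    have hOwnSucc : pvOwnK lines (k + 1)
        = (if PySem.Str.endswith (PySem.Str.lower (PySem.Str.strip x)) ":"
           then some (PySem.Str.lower (PySem.Str.strip x)) else pvOwnK lines k) := by
      unfold pvOwnK
      rw [List.take_succ, List.getElem?_eq_getElem hklt, hx, Option.toList_some,
        List.reverse_append, List.reverse_singleton, List.singleton_append, List.map_cons]
      by_cases he : PySem.Str.endswith (PySem.Str.lower (PySem.Str.strip x)) ":" = true
      · rw [List.find?_cons_of_pos (by simpa using he)]
        simp only [he, if_true]
      · have he' : PySem.Str.endswith (PySem.Str.lower (PySem.Str.strip x)) ":" = false := by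
          simpa using he
        rw [List.find?_cons_of_neg (by simpa using he')]
        simp only [he', Bool.false_eq_true, if_false]
    rw [hksucc] at hcons ⊢
    rw [ih (k + 1) hdrop, hget, hownk, hOwnSucc]
    simp only [pvCnt]
    exact Nat.add_comm _ _

-- ===== VERDICT (by name: the statement is the Claim_ definition above) =====
theorem agenda_items_summary_is_too_short_py_spec : Claim_equal_agenda_items_summary_is_too_short_py := by
  intro text _
  unfold Spec_agenda_items_summary_is_too_short_py
  unfold agenda_items_summary_is_too_short_py agenda_items_summary_is_too_short_py_alt
  simp only [List.not_all_eq_any_not, List.countP_eq_length_filter]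
  by_cases h0 : text = ""
  · simp [h0]
  · simp only [beq_iff_eq, if_neg h0]
    split_ifs with h1 h2 h3
    · rfl
    · rfl
    · rfl
    · have hA := pvA_cnt (PySem.Str.splitlines (PySem.Str.strip text)) none 0
      have hB := pvB_cnt (PySem.Str.splitlines (PySem.Str.strip text))
        (PySem.Str.splitlines (PySem.Str.strip text)) 0 rfl
      have hnone : ((none : Option String) == some "top actions:") = false := by decide
      have hown0 : pvOwnK (PySem.Str.splitlines (PySem.Str.strip text)) 0 = none := by
        unfold pvOwnK; simp
      rw [hnone] at hA
      rw [hown0] at hB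
      rw [List.countP_eq_length_filter] at hB
      have hcast : ((0 : Nat) : Int) = (0 : Int) := rfl
      rw [show ((0:Nat) : Int) = (0:Int) from rfl] at hB
      rw [hA, hB, decide_eq_decide]
      omega
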